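-- pv_equiv track=rewrite | github.com/agoraciudadana/agora-election | agora_election/crypto.py | constant_time_compare
-- ===== SOURCE A (Python) =====
-- def force_bytes(s, encoding='utf-8', errors='strict'):
--     '''
--     Force input to be encoded as bytes.
--
--     If it's a string, encode it. if it's bytes already, return it.
--     '''
--     if isinstance(s, bytes):
--         return s
--     else:
--         return s.encode(encoding, errors)
--
-- def constant_time_compare(val1, val2):
--     """
--     Returns True if the two strings are equal, False otherwise.
--
--     The time taken is independent of the number of characters that match.
--     """
--     val1 = force_bytes(val1)
--     val2 = force_bytes(val2)
--     if len(val1) != len(val2):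
--         return False
--     result = 0
--     for x, y in zip(val1, val2):
--         result |= x ^ y
--     return result == 0
-- ===== SOURCE B (Python) =====
-- def force_bytes(s, encoding='utf-8', errors='strict'):
--     '''
--     Force input to be encoded as bytes.
--
--     If it's a string, encode it. if it's bytes already, return it.
--     '''
--     if isinstance(s, bytes):
--         return s
--     else:
--         return s.encode(encoding, errors)
--
-- def constant_time_compare(val1, val2):
--     """
--     Returns True if the two strings are equal, False otherwise.
--     (Not constant-time: uses the direct byte-string comparison.)
--     """
--     return force_bytes(val1) == force_bytes(val2)
-- ===== Notes on version B (the rewrite author's own statement) =====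
-- stated objective: simpler
-- what changed: Replaces the length guard plus XOR-accumulating loop over zipped bytes with a single direct byte-string equality comparison (dropping the constant-time timing property, which does not affect the return value).
import Mathlib
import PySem

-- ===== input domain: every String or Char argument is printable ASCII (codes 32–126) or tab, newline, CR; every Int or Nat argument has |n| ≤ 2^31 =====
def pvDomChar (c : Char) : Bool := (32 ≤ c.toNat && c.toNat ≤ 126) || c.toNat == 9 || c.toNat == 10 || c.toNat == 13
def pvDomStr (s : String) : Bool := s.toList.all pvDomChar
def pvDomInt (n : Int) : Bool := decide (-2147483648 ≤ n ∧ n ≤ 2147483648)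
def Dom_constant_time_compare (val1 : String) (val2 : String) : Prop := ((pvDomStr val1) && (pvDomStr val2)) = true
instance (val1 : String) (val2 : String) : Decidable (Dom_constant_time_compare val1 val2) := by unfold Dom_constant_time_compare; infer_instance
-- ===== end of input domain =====

-- B replaces A's length guard + XOR-accumulating loop with a direct equality comparison (objective: simpler; the constant-time property is a side effect, not a return value).
-- Ports are exact on Dom (ASCII strings), where the UTF-8 encoding is one byte per character equal to the character code.

-- ===== PORT A =====
def constant_time_compare (val1 : String) (val2 : String) : Bool :=
  -- force_bytes: on the ASCII domain, UTF-8 bytes = character codes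
  let b1 := val1.toList.map Char.toNat
  let b2 := val2.toList.map Char.toNat
  if b1.length != b2.length then false
  else ((b1.zip b2).foldl (fun r p => r ||| (p.1 ^^^ p.2)) 0) == 0

-- ===== PORT B =====
def constant_time_compare_alt (val1 : String) (val2 : String) : Bool :=
  -- force_bytes(val1) == force_bytes(val2): byte equality = string equality
  (val1.toList.map Char.toNat) == (val2.toList.map Char.toNat)

-- ===== PRECONDITION & SPEC =====
def Spec_constant_time_compare (val1 : String) (val2 : String) (out : Bool) : Prop := out = constant_time_compare_alt val1 val2
instance (val1 : String) (val2 : String) (out : Bool) : Decidable (Spec_constant_time_compare val1 val2 out) := by unfold Spec_constant_time_compare; infer_instance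

-- ===== CLAIM (what is proved, stated in full; the proofs are below) =====
def Claim_equal_constant_time_compare : Prop := ∀ (val1 : String) (val2 : String), Dom_constant_time_compare val1 val2 → Spec_constant_time_compare val1 val2 (constant_time_compare val1 val2)

-- ===== LEMMAS AND PROOFS =====
theorem pv_or_eq_zero (a b : Nat) : a ||| b = 0 ↔ a = 0 ∧ b = 0 := by
  constructor
  · intro h
    refine ⟨Nat.eq_of_testBit_eq fun i => ?_, Nat.eq_of_testBit_eq fun i => ?_⟩ <;>
      have := congrArg (fun n => n.testBit i) h <;>
      simp [Nat.testBit_or] at this ⊢ <;> tauto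
  · rintro ⟨rfl, rfl⟩; rfl

theorem pv_foldl_or_eq_zero (l : List (Nat × Nat)) (acc : Nat) :
    (l.foldl (fun r p => r ||| (p.1 ^^^ p.2)) acc = 0) ↔ (acc = 0 ∧ ∀ p ∈ l, p.1 = p.2) := by
  induction l generalizing acc with
  | nil => simp
  | cons h t ih =>
    simp only [List.foldl_cons, ih, List.mem_cons, pv_or_eq_zero, Nat.xor_eq_zero_iff]
    constructor
    · rintro ⟨⟨ha, hx⟩, hall⟩
      refine ⟨ha, fun p hp => ?_⟩
      rcases hp with rfl | hp
      · exact hx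
      · exact hall p hp
    · rintro ⟨ha, hall⟩
      exact ⟨⟨ha, hall h (Or.inl rfl)⟩, fun p hp => hall p (Or.inr hp)⟩

theorem pv_zip_eq (l1 l2 : List Nat) (hlen : l1.length = l2.length) :
    (∀ p ∈ l1.zip l2, p.1 = p.2) ↔ l1 = l2 := by
  induction l1 generalizing l2 with
  | nil =>
    cases l2 with
    | nil => simp
    | cons _ _ => simp at hlen
  | cons h t ih =>
    cases l2 with
    | nil => simp at hlen
    | cons h2 t2 =>
      have hlen' : t.length = t2.length := by
        simpa using hlen
      simp only [List.zip_cons_cons, List.mem_cons, List.cons.injEq]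
      constructor
      · intro hall
        exact ⟨hall (h, h2) (Or.inl rfl), (ih t2 hlen').mp fun p hp => hall p (Or.inr hp)⟩
      · rintro ⟨rfl, rfl⟩ p hp
        rcases hp with rfl | hp
        · rfl
        · exact (ih _ (Nat.succ_injective hlen)).mpr rfl p hp

-- ===== VERDICT (by name: the statement is the Claim_ definition above) =====
theorem constant_time_compare_spec : Claim_equal_constant_time_compare := by
  intro val1 val2 _
  unfold Spec_constant_time_compare constant_time_compare constant_time_compare_alt
  set b1 := val1.toList.map Char.toNat with hb1
  set b2 := val2.toList.map Char.toNat with hb2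
  dsimp only
  by_cases hlen : b1.length = b2.length
  · rw [show (b1.length != b2.length) = false by simp [hlen]]
    simp only [Bool.false_eq_true, if_false]
    by_cases heq : b1 = b2
    · rw [show (b1 == b2) = true by simp [heq], beq_iff_eq]
      exact (pv_foldl_or_eq_zero _ 0).mpr ⟨rfl, (pv_zip_eq b1 b2 hlen).mpr heq⟩
    · rw [show (b1 == b2) = false by simp [heq], beq_eq_false_iff_ne]
      intro hz
      exact heq ((pv_zip_eq b1 b2 hlen).mp ((pv_foldl_or_eq_zero _ 0).mp hz).2)
  · rw [show (b1.length != b2.length) = true by simp [hlen]]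
    simp only [if_true]
    have hne : b1 ≠ b2 := fun h => hlen (by rw [h])
    simp [hne]
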